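-- pv_equiv track=rewrite | github.com/5dv214vt25/Data-driven-BPS | backend/agent_simulator/src/source/visualization.py | get_role_informatation
-- ===== SOURCE A (Python) =====
-- def get_role_informatation(
--     sorted_roles,
--     agents,
--     agent_for_role,
--     agent_transition_probabilities,
--     agent_to_resource,
-- ):
--     role_information = {}
--     for role in sorted_roles:
--         role_information[role] = {}
--         activities_str = get_all_activities_for_role_as_string(
--             agents, role, agent_for_role, agent_transition_probabilities
--         )
--         role_information[role]["activities"] = activities_str
--         resources = []
--         for agent, agents_role in agent_for_role.items():
--             if agents_role == role:
--                 resource = agent_to_resource.get(int(agent))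
--                 resources.append(resource)
--         role_information[role]["resources"] = "\n".join(resources)
--     role_information = dict(sorted(role_information.items()))
--     return role_information
--
-- def get_all_activities_for_role_as_string(agents, target_role, agent_for_role, agent_transition_probabilities):
--     activities = []
--     for agent in agents:
--         if agent_for_role.get(str(agent)) == target_role:
--             for activity, transtion_agents_dict in agent_transition_probabilities[agent].items():
--                 if activity not in activities and activity != "zzz_end":
--                     activities.append(activity)
--     return "\n".join(activities)
-- ===== SOURCE B (Python) =====
-- def get_role_informatation(
--     sorted_roles,
--     agents,
--     agent_for_role,
--     agent_transition_probabilities,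
--     agent_to_resource,
-- ):
--     roleset = set(sorted_roles)
--     # one pass over agent_for_role: group resources by role
--     role_resources = {}
--     for agent, r in agent_for_role.items():
--         if r in roleset:
--             role_resources.setdefault(r, []).append(agent_to_resource.get(int(agent)))
--     # one pass over agents: per-role ordered activity lists with a seen-set for O(1) dedup
--     role_acts = {}
--     for agent in agents:
--         r = agent_for_role.get(str(agent))
--         if r in roleset:
--             acts, seen = role_acts.get(r, ([], set()))
--             for activity in agent_transition_probabilities[agent]:
--                 if activity != "zzz_end" and activity not in seen:
--                     seen.add(activity)
--                     acts.append(activity)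
--             role_acts[r] = (acts, seen)
--     return {
--         role: {
--             "activities": "\n".join(role_acts.get(role, ([], None))[0]),
--             "resources": "\n".join(role_resources.get(role, [])),
--         }
--         for role in sorted(roleset)
--     }
-- ===== Notes on version B (the rewrite author's own statement) =====
-- stated objective: faster
-- what changed: A rescans the whole agents list and the whole agent_for_role dict once per role and dedups activities with a quadratic list-membership test; B makes one grouping pass over agent_for_role and one over agents (per-role seen-sets for O(1) dedup) and then reads the grouped dicts for each role of the sorted distinct-role list.
import Mathlib
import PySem

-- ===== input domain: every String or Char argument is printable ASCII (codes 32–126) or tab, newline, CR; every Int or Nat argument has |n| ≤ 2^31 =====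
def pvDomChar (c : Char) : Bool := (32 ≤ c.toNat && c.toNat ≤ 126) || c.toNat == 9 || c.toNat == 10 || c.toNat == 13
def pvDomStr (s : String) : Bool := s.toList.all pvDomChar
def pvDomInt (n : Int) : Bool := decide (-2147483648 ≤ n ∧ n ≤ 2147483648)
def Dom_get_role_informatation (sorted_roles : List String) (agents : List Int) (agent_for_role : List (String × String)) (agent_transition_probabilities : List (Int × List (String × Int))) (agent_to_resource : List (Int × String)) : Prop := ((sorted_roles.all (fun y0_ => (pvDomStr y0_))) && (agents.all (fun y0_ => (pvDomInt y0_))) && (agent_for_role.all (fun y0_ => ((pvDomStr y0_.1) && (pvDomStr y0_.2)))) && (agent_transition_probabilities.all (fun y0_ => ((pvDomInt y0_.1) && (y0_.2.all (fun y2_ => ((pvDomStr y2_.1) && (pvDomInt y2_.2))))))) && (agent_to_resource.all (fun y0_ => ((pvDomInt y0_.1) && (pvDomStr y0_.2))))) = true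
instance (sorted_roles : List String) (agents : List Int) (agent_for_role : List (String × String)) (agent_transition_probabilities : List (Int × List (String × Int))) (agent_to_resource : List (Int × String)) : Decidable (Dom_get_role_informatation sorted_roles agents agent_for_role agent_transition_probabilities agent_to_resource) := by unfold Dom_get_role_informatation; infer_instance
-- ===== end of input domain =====

-- B replaces A's per-role rescans of agents/agent_for_role and its quadratic list-membership
-- dedup by one-pass grouping dicts and a per-role seen-set (objective: faster).

-- ===== PORT A =====
-- get_all_activities_for_role_as_string: loop over agents; on a role match, loop over the
-- agent's transition dict, appending unseen activities (list membership test), then join.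
def pvActsA (agents : List Int) (target_role : String)
    (afr : PySem.Dict String String) (atp : PySem.Dict Int (List (String × Int))) : String :=
  PySem.Str.join "\n" <| agents.foldl (fun activities agent =>
    if afr.get? (PySem.Int.toStr agent) == some target_role then
      (PySem.Dict.ofList (atp.getD agent [])).items.foldl (fun acts p =>
        if !acts.contains p.1 && p.1 != "zzz_end" then acts ++ [p.1] else acts) activities
    else activities) []

-- the two-entry inner dict {"activities": …, "resources": …} of A, as its item list
def pvEntryA (agents : List Int) (afr : PySem.Dict String String)
    (atp : PySem.Dict Int (List (String × Int))) (a2r : PySem.Dict Int String)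
    (role : String) : List (String × String) :=
  [("activities", pvActsA agents role afr atp),
   ("resources", PySem.Str.join "\n" (afr.items.foldl (fun rs p =>
      if p.2 == role then rs ++ [((PySem.Int.ofStr? p.1).bind a2r.get?).getD ""] else rs) []))]
  -- `agent_to_resource.get(int(agent))`: under Pre_ the parse succeeds and the key is present,
  -- so the total form `(ofStr? …).bind get? |>.getD ""` is exact there (A raises otherwise).

def get_role_informatation (sorted_roles : List String) (agents : List Int) (agent_for_role : List (String × String)) (agent_transition_probabilities : List (Int × List (String × Int))) (agent_to_resource : List (Int × String)) : List (String × List (String × String)) :=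
  let afr := PySem.Dict.ofList agent_for_role
  let atp := PySem.Dict.ofList agent_transition_probabilities
  let a2r := PySem.Dict.ofList agent_to_resource
  let role_information := sorted_roles.foldl (fun (ri : PySem.Dict String (List (String × String))) role =>
    ri.insert role (pvEntryA agents afr atp a2r role)) PySem.Dict.empty
  PySem.List.sorted role_information.items (fun p => p.1)

-- ===== PORT B =====
def get_role_informatation_alt (sorted_roles : List String) (agents : List Int) (agent_for_role : List (String × String)) (agent_transition_probabilities : List (Int × List (String × Int))) (agent_to_resource : List (Int × String)) : List (String × List (String × String)) :=
  let afr := PySem.Dict.ofList agent_for_role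
  let atp := PySem.Dict.ofList agent_transition_probabilities
  let a2r := PySem.Dict.ofList agent_to_resource
  let roleset : PySem.Set String := PySem.Set.ofList sorted_roles
  -- one pass over agent_for_role.items(): group resources by role
  let role_resources := afr.items.foldl (fun (d : PySem.Dict String (List String)) p =>
    if PySem.Set.contains roleset p.2 then
      d.modify p.2 [] (· ++ [((PySem.Int.ofStr? p.1).bind a2r.get?).getD ""])
    else d) PySem.Dict.empty
  -- one pass over agents: per-role (ordered activity list, seen-set)
  let role_acts := agents.foldl (fun (d : PySem.Dict String (List String × PySem.Set String)) agent =>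
    match afr.get? (PySem.Int.toStr agent) with
    | none => d
    | some r =>
      if PySem.Set.contains roleset r then
        d.insert r ((PySem.Dict.ofList (atp.getD agent [])).keys.foldl
          (fun (q : List String × PySem.Set String) activity =>
            if activity != "zzz_end" && !PySem.Set.contains q.2 activity then
              (q.1 ++ [activity], PySem.Set.add q.2 activity)
            else q) (d.getD r ([], PySem.Set.empty)))
      else d) PySem.Dict.empty
  (PySem.List.sorted roleset (fun x => x)).map (fun role =>
    (role, [("activities", PySem.Str.join "\n" (role_acts.getD role ([], PySem.Set.empty)).1),
            ("resources", PySem.Str.join "\n" (role_resources.getD role []))]))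

-- ===== PRECONDITION & SPEC =====
-- Pre_ excludes exactly the inputs where the Python A raises: an agent whose role is in
-- sorted_roles but is missing from agent_transition_probabilities (KeyError), and an
-- agent_for_role key mapped to a listed role that does not parse as int (ValueError) or is
-- missing from agent_to_resource (None makes "\n".join raise TypeError).
def Pre_get_role_informatation (sorted_roles : List String) (agents : List Int) (agent_for_role : List (String × String)) (agent_transition_probabilities : List (Int × List (String × Int))) (agent_to_resource : List (Int × String)) : Prop :=
  ((agents.all (fun a =>
      match (PySem.Dict.ofList agent_for_role).get? (PySem.Int.toStr a) with
      | some r => !(sorted_roles.contains r) || (PySem.Dict.ofList agent_transition_probabilities).contains a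
      | none => true))
   && (PySem.Dict.ofList agent_for_role).items.all (fun p =>
      !(sorted_roles.contains p.2) || ((PySem.Int.ofStr? p.1).bind (PySem.Dict.ofList agent_to_resource).get?).isSome)) = true
instance (sorted_roles : List String) (agents : List Int) (agent_for_role : List (String × String)) (agent_transition_probabilities : List (Int × List (String × Int))) (agent_to_resource : List (Int × String)) : Decidable (Pre_get_role_informatation sorted_roles agents agent_for_role agent_transition_probabilities agent_to_resource) := by unfold Pre_get_role_informatation; infer_instance

def pvWitness_get_role_informatation : List String × List Int × (List (String × String)) × (List (Int × List (String × Int))) × (List (Int × String)) :=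
  (["r"], [1], [("1", "r")], [(1, [("a", 1)])], [(1, "res")])

def Spec_get_role_informatation (sorted_roles : List String) (agents : List Int) (agent_for_role : List (String × String)) (agent_transition_probabilities : List (Int × List (String × Int))) (agent_to_resource : List (Int × String)) (out : List (String × List (String × String))) : Prop := out = get_role_informatation_alt sorted_roles agents agent_for_role agent_transition_probabilities agent_to_resource
instance (sorted_roles : List String) (agents : List Int) (agent_for_role : List (String × String)) (agent_transition_probabilities : List (Int × List (String × Int))) (agent_to_resource : List (Int × String)) (out : List (String × List (String × String))) : Decidable (Spec_get_role_informatation sorted_roles agents agent_for_role agent_transition_probabilities agent_to_resource out) := by unfold Spec_get_role_informatation; infer_instance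

-- ===== CLAIM (what is proved, stated in full; the proofs are below) =====
def Claim_equal_get_role_informatation : Prop := ∀ (sorted_roles : List String) (agents : List Int) (agent_for_role : List (String × String)) (agent_transition_probabilities : List (Int × List (String × Int))) (agent_to_resource : List (Int × String)), Dom_get_role_informatation sorted_roles agents agent_for_role agent_transition_probabilities agent_to_resource → Pre_get_role_informatation sorted_roles agents agent_for_role agent_transition_probabilities agent_to_resource → Spec_get_role_informatation sorted_roles agents agent_for_role agent_transition_probabilities agent_to_resource (get_role_informatation sorted_roles agents agent_for_role agent_transition_probabilities agent_to_resource)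

-- ===== LEMMAS AND PROOFS =====

theorem pv_list_eq_map {ν : Type} (F : String → ν) :
    ∀ (xs : List (String × ν)), (∀ p ∈ xs, p.2 = F p.1) →
      xs = (xs.map (·.1)).map (fun k => (k, F k)) := by
  intro xs h
  induction xs with
  | nil => rfl
  | cons p t ih =>
    obtain ⟨k, v⟩ := p
    have hp : v = F k := h (k, v) (by simp)
    simp only [List.map_cons]
    rw [← ih (fun q hq => h q (by simp [hq])), hp]

theorem pv_inner (keys : List String) :
    ∀ (q : List String × PySem.Set String), q.2 = q.1 →
      keys.foldl (fun (q : List String × PySem.Set String) a =>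
          if a != "zzz_end" && !PySem.Set.contains q.2 a then (q.1 ++ [a], PySem.Set.add q.2 a) else q) q
        = (keys.foldl (fun acts a => if !acts.contains a && a != "zzz_end" then acts ++ [a] else acts) q.1,
           keys.foldl (fun acts a => if !acts.contains a && a != "zzz_end" then acts ++ [a] else acts) q.1) := by
  induction keys with
  | nil => intro q h; cases q; simp_all
  | cons a t ih =>
    intro q h
    obtain ⟨acts, sn⟩ := q
    simp only at h; rw [show sn = acts from h] at *; clear h
    simp only [List.foldl_cons]
    by_cases hz : a = "zzz_end"
    · have h1 : (a != "zzz_end") = false := by simp [hz]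
      have h2 : (!acts.contains a && (a != "zzz_end")) = false := by simp [h1]
      rw [show (if (a != "zzz_end") && !PySem.Set.contains acts a then ((acts ++ [a], PySem.Set.add acts a) : List String × PySem.Set String) else (acts, acts)) = (acts, acts) by rw [show ((a != "zzz_end") && !PySem.Set.contains acts a) = false by simp [h1]]; rfl]
      rw [show (if !acts.contains a && (a != "zzz_end") then acts ++ [a] else acts) = acts by rw [h2]; rfl]
      exact ih (acts, acts) rfl
    · have h1 : (a != "zzz_end") = true := by simp [hz]
      by_cases hm : a ∈ acts
      · have e1 : ((a != "zzz_end") && !PySem.Set.contains acts a) = false := by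
          simp [PySem.Set.contains, hm]
        have e2 : (!acts.contains a && (a != "zzz_end")) = false := by simp [hm]
        rw [show (if (a != "zzz_end") && !PySem.Set.contains acts a then ((acts ++ [a], PySem.Set.add acts a) : List String × PySem.Set String) else (acts, acts)) = (acts, acts) by rw [e1]; rfl]
        rw [show (if !acts.contains a && (a != "zzz_end") then acts ++ [a] else acts) = acts by rw [e2]; rfl]
        exact ih (acts, acts) rfl
      · have e1 : ((a != "zzz_end") && !PySem.Set.contains acts a) = true := by
          simp [PySem.Set.contains, hm, hz]
        have e2 : (!acts.contains a && (a != "zzz_end")) = true := by simp [hm, hz]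
        have hadd : PySem.Set.add acts a = acts ++ [a] := by
          simp [PySem.Set.add, PySem.Set.contains, hm]
        rw [show (if (a != "zzz_end") && !PySem.Set.contains acts a then ((acts ++ [a], PySem.Set.add acts a) : List String × PySem.Set String) else (acts, acts)) = (acts ++ [a], acts ++ [a]) by rw [e1, hadd]; rfl]
        rw [show (if !acts.contains a && (a != "zzz_end") then acts ++ [a] else acts) = acts ++ [a] by rw [e2]; rfl]
        exact ih (acts ++ [a], acts ++ [a]) rfl

theorem pv_items_snd {ν : Type} (F : String → ν) :
    ∀ (l : List String) (d : PySem.Dict String ν),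
      (∀ p ∈ d.items, p.2 = F p.1) →
      ∀ p ∈ (l.foldl (fun ri role => ri.insert role (F role)) d).items, p.2 = F p.1 := by
  intro l
  induction l with
  | nil => intro d h; exact h
  | cons x t ih =>
    intro d h
    simp only [List.foldl_cons]
    refine ih _ ?_
    intro p hp
    rcases (PySem.Dict.mem_items_insert d x (F x) p).1 hp with h1 | ⟨h2, _⟩
    · subst h1; rfl
    · exact h p h2

theorem pv_keys_helper {ν : Type} (F : String → ν) (l : List String) :
    (l.foldl (fun ri role => ri.insert role (F role)) (PySem.Dict.empty : PySem.Dict String ν)).keys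
      = PySem.Set.ofList l := by
  have := PySem.Dict.keys_foldl_insert l (fun _ x => F x) (PySem.Dict.empty : PySem.Dict String ν)
  simpa [PySem.Dict.keys_empty, PySem.Set.update_nil_left] using this

theorem pv_A_items {ν : Type} (F : String → ν) (l : List String) :
    (l.foldl (fun ri role => ri.insert role (F role)) (PySem.Dict.empty : PySem.Dict String ν)).items
      = (PySem.Set.ofList l).map (fun r => (r, F r)) := by
  have h2 := pv_items_snd F l (PySem.Dict.empty : PySem.Dict String ν) (by simp [PySem.Dict.empty])
  have h3 := pv_list_eq_map F _ h2
  calc (l.foldl (fun ri role => ri.insert role (F role)) (PySem.Dict.empty : PySem.Dict String ν)).items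
      = ((l.foldl (fun ri role => ri.insert role (F role)) (PySem.Dict.empty : PySem.Dict String ν)).items.map (·.1)).map (fun k => (k, F k)) := h3
    _ = (PySem.Set.ofList l).map (fun r => (r, F r)) := by
        rw [show (l.foldl (fun ri role => ri.insert role (F role)) (PySem.Dict.empty : PySem.Dict String ν)).items.map (·.1) = (l.foldl (fun ri role => ri.insert role (F role)) (PySem.Dict.empty : PySem.Dict String ν)).keys from rfl, pv_keys_helper]

theorem pv_sorted_map_fst {ν : Type} (sr : List String) (E : String → ν) :
    PySem.List.sorted ((PySem.Set.ofList sr).map (fun r => (r, E r))) (fun p => p.1)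
      = (PySem.List.sorted (PySem.Set.ofList sr) (fun x => x)).map (fun r => (r, E r)) := by
  apply PySem.List.sorted_eq_of_perm_of_pairwise_lt
  · exact ((PySem.List.sorted_perm (PySem.Set.ofList sr) (fun x => x) false).map _)
  · have h := PySem.List.sorted_ofList_pairwise_lt (κ := String) sr
    have := List.Pairwise.map (l := PySem.List.sorted (PySem.Set.ofList sr) (fun x => x))
      (f := fun r => (r, E r)) (R := fun a b => a < b) (S := fun (a b : String × ν) => a.1 < b.1)
      (by intro a b hab; simpa using hab) h
    exact this

theorem pv_acts (afr : PySem.Dict String String) (atp : PySem.Dict Int (List (String × Int)))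
    (roleset : PySem.Set String) :
    ∀ (l : List Int) (d : PySem.Dict String (List String × PySem.Set String)),
      (∀ r, (d.getD r ([], PySem.Set.empty)).2 = (d.getD r ([], PySem.Set.empty)).1) →
      (∀ r, ((l.foldl (fun d agent =>
            match afr.get? (PySem.Int.toStr agent) with
            | none => d
            | some r' =>
              if PySem.Set.contains roleset r' then
                d.insert r' ((PySem.Dict.ofList (atp.getD agent [])).keys.foldl
                  (fun (q : List String × PySem.Set String) a =>
                    if a != "zzz_end" && !PySem.Set.contains q.2 a then (q.1 ++ [a], PySem.Set.add q.2 a) else q)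
                  (d.getD r' ([], PySem.Set.empty)))
              else d) d).getD r ([], PySem.Set.empty)).2
          = ((l.foldl (fun d agent =>
            match afr.get? (PySem.Int.toStr agent) with
            | none => d
            | some r' =>
              if PySem.Set.contains roleset r' then
                d.insert r' ((PySem.Dict.ofList (atp.getD agent [])).keys.foldl
                  (fun (q : List String × PySem.Set String) a =>
                    if a != "zzz_end" && !PySem.Set.contains q.2 a then (q.1 ++ [a], PySem.Set.add q.2 a) else q)
                  (d.getD r' ([], PySem.Set.empty)))
              else d) d).getD r ([], PySem.Set.empty)).1) ∧
      ∀ r, PySem.Set.contains roleset r = true →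
        ((l.foldl (fun d agent =>
            match afr.get? (PySem.Int.toStr agent) with
            | none => d
            | some r' =>
              if PySem.Set.contains roleset r' then
                d.insert r' ((PySem.Dict.ofList (atp.getD agent [])).keys.foldl
                  (fun (q : List String × PySem.Set String) a =>
                    if a != "zzz_end" && !PySem.Set.contains q.2 a then (q.1 ++ [a], PySem.Set.add q.2 a) else q)
                  (d.getD r' ([], PySem.Set.empty)))
              else d) d).getD r ([], PySem.Set.empty)).1
          = l.foldl (fun activities agent =>
              if afr.get? (PySem.Int.toStr agent) == some r then
                (PySem.Dict.ofList (atp.getD agent [])).items.foldl (fun acts p =>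
                  if !acts.contains p.1 && p.1 != "zzz_end" then acts ++ [p.1] else acts) activities
              else activities) (d.getD r ([], PySem.Set.empty)).1 := by
  intro l
  induction l with
  | nil => intro d hInv; exact ⟨hInv, fun r _ => rfl⟩
  | cons a t ih =>
    intro d hInv
    simp only [List.foldl_cons]
    rcases hafr : afr.get? (PySem.Int.toStr a) with _ | r'
    · -- lookup none: both sides skip
      refine ⟨(ih d hInv).1, ?_⟩
      intro r hr
      have hcond : ((none : Option String) == some r) = false := rfl
      rw [hcond]
      simp only [Bool.false_eq_true, if_false]
      exact (ih d hInv).2 r hr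
    · rcases hrs : PySem.Set.contains roleset r' with _ | _
      · -- r' not in roleset: B skips; A's target roles r all have contains r = true ≠ r'
        simp only [hrs]
        simp only [Bool.false_eq_true, if_false]
        refine ⟨(ih d hInv).1, ?_⟩
        intro r hr
        have hne : r' ≠ r := by intro h; rw [h] at hrs; rw [hr] at hrs; cases hrs
        have hcond : (some r' == some r) = false := by simp [hne]
        rw [hcond]
        simp only [Bool.false_eq_true, if_false]
        exact (ih d hInv).2 r hr
      · -- r' in roleset: B inserts the inner fold result
        simp only [hrs, if_true]
        have hq : (d.getD r' ([], PySem.Set.empty)).2 = (d.getD r' ([], PySem.Set.empty)).1 := hInv r'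
        set keys := (PySem.Dict.ofList (atp.getD a [])).keys with hkeys
        have hin := pv_inner keys (d.getD r' ([], PySem.Set.empty)) hq
        set X := keys.foldl (fun acts a => if !acts.contains a && a != "zzz_end" then acts ++ [a] else acts)
          (d.getD r' ([], PySem.Set.empty)).1 with hX
        set d' := d.insert r' (keys.foldl (fun (q : List String × PySem.Set String) a =>
          if a != "zzz_end" && !PySem.Set.contains q.2 a then (q.1 ++ [a], PySem.Set.add q.2 a) else q)
          (d.getD r' ([], PySem.Set.empty))) with hd'
        have hgetD' : ∀ r, d'.getD r ([], PySem.Set.empty)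
            = if r = r' then (X, X) else d.getD r ([], PySem.Set.empty) := by
          intro r
          rw [hd', PySem.Dict.getD_insert, hin, hX]
        have hInv' : ∀ r, (d'.getD r ([], PySem.Set.empty)).2 = (d'.getD r ([], PySem.Set.empty)).1 := by
          intro r
          rw [hgetD']
          by_cases h : r = r'
          · simp [h]
          · simp [h]; exact hInv r
        refine ⟨(ih d' hInv').1, ?_⟩
        intro r hr
        have hA : ((PySem.Dict.ofList (atp.getD a [])).items.foldl (fun acts p =>
              if !acts.contains p.1 && p.1 != "zzz_end" then acts ++ [p.1] else acts)
              (d.getD r ([], PySem.Set.empty)).1)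
            = (PySem.Dict.ofList (atp.getD a [])).keys.foldl (fun acts x =>
              if !acts.contains x && x != "zzz_end" then acts ++ [x] else acts)
              (d.getD r ([], PySem.Set.empty)).1 := by
          rw [show (PySem.Dict.ofList (atp.getD a [])).keys
              = (PySem.Dict.ofList (atp.getD a [])).items.map (·.1) from rfl]
          rw [List.foldl_map]
        by_cases h : r = r'
        · subst h
          have hcond : (some r == some r) = true := by simp
          rw [hcond]
          simp only [if_true]
          have := (ih d' hInv').2 r hr
          rw [this, hgetD']
          rw [hA, ← hkeys, hX]
          simp
        · have hcond : (some r' == some r) = false := by simp [Ne.symm h]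
          rw [hcond]
          simp only [Bool.false_eq_true, if_false]
          have := (ih d' hInv').2 r hr
          rw [this, hgetD']
          simp [h]

theorem pv_grouped (c : String → Bool) (f : String × String → String) :
    ∀ (l : List (String × String)) (d : PySem.Dict String (List String)) (r : String),
      (l.foldl (fun d p => if c p.2 then d.modify p.2 [] (· ++ [f p]) else d) d).getD r []
        = d.getD r [] ++ (l.filter (fun p => c p.2 && p.2 == r)).map f := by
  intro l
  induction l with
  | nil => simp
  | cons p t ih =>
    intro d r
    simp only [List.foldl_cons, List.filter_cons]
    cases hc : c p.2 with
    | false => simp [ih]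
    | true =>
      by_cases hr : p.2 = r
      · simp [hr, ih]
      · have hbe : (p.2 == r) = false := by simp [hr]
        simp [hbe, ih, PySem.Dict.getD_modify, Ne.symm hr]

-- A's result, in closed form: the first-occurrence role set mapped through pvEntryA, sorted
theorem pv_A_char (sorted_roles : List String) (agents : List Int) (agent_for_role : List (String × String)) (agent_transition_probabilities : List (Int × List (String × Int))) (agent_to_resource : List (Int × String)) :
    get_role_informatation sorted_roles agents agent_for_role agent_transition_probabilities agent_to_resource
      = (PySem.List.sorted (PySem.Set.ofList sorted_roles) (fun x => x)).map (fun r =>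
          (r, pvEntryA agents (PySem.Dict.ofList agent_for_role) (PySem.Dict.ofList agent_transition_probabilities) (PySem.Dict.ofList agent_to_resource) r)) := by
  simp only [get_role_informatation]
  rw [pv_A_items, pv_sorted_map_fst]

-- ===== VERDICT (by name: the statement is the Claim_ definition above) =====
theorem get_role_informatation_spec : Claim_equal_get_role_informatation := by
  intro sorted_roles agents agent_for_role agent_transition_probabilities agent_to_resource _ _
  unfold Spec_get_role_informatation
  rw [pv_A_char]
  simp only [get_role_informatation_alt]
  apply List.map_congr_left
  intro r hrmem
  have hr : PySem.Set.contains (PySem.Set.ofList sorted_roles) r = true := by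
    have : r ∈ (PySem.Set.ofList sorted_roles : List String) :=
      (PySem.List.mem_sorted _ _ _ _).1 hrmem
    simpa [PySem.Set.contains] using this
  have hInv : ∀ s, (((PySem.Dict.empty : PySem.Dict String (List String × PySem.Set String)).getD s ([], PySem.Set.empty)).2
      = ((PySem.Dict.empty : PySem.Dict String (List String × PySem.Set String)).getD s ([], PySem.Set.empty)).1) := by
    intro s; rfl
  have hacts := (pv_acts (PySem.Dict.ofList agent_for_role) (PySem.Dict.ofList agent_transition_probabilities)
    (PySem.Set.ofList sorted_roles) agents PySem.Dict.empty hInv).2 r hr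
  have hres := pv_grouped (fun s => PySem.Set.contains (PySem.Set.ofList sorted_roles) s)
    (fun p => ((PySem.Int.ofStr? p.1).bind (PySem.Dict.ofList agent_to_resource).get?).getD "")
    (PySem.Dict.ofList agent_for_role).items PySem.Dict.empty r
  simp only [pvEntryA, pvActsA]
  simp only [Prod.mk.injEq, List.cons.injEq, true_and, and_true]
  constructor
  · -- activities component
    exact congrArg _ hacts.symm
  · -- resources component
    rw [show (List.foldl (fun rs p =>
          if (p.2 == r) = true then
            rs ++ [((PySem.Int.ofStr? p.1).bind (PySem.Dict.ofList agent_to_resource).get?).getD ""]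
          else rs)
        [] (PySem.Dict.ofList agent_for_role).items)
      = [] ++ ((PySem.Dict.ofList agent_for_role).items.filter (fun p => p.2 == r)).map
          (fun p => ((PySem.Int.ofStr? p.1).bind (PySem.Dict.ofList agent_to_resource).get?).getD "")
      from PySem.List.foldl_append_if _ _ _ _]
    rw [hres]
    simp only [PySem.Dict.getD_empty, List.nil_append]
    refine congrArg _ (congrArg _ ?_)
    apply List.filter_congr
    intro p _
    have hrl : r ∈ sorted_roles := by
      have h' : r ∈ (PySem.Set.ofList sorted_roles : List String) := by
        simpa [PySem.Set.contains] using hr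
      exact (PySem.Set.mem_ofList _ _).1 h'
    by_cases hp : p.2 = r
    · simp [hp, hrl]
    · simp [hp]
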